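-- pv_equiv track=rewrite | github.com/DanilKrivonos/BioCAT | BioCAT.py | iterator
-- ===== SOURCE A (Python) =====
-- def iterator(current_node, graph, tour):
--     priv_t = tour.copy()
--
--     copy = graph.copy()
--     for edge in copy:
--         if current_node in edge:
--
--             c_edge = edge.copy()
--             c_edge.remove(current_node)
--             current_node = c_edge[0]
--
--             if current_node not in tour:
--                 tour.append(current_node)
--
--     if priv_t != tour:
--
--         iterator(current_node, graph, tour)
--
--     return tour
-- ===== SOURCE B (Python) =====
-- def iterator(current_node, graph, tour):
--     # Iterative fixed-point loop with a membership set; mutates `tour` in place like A.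
--     seen = set(tour)
--     changed = True
--     while changed:
--         changed = False
--         for edge in graph:
--             if current_node in edge:
--                 current_node = edge[1] if edge[0] == current_node else edge[0]
--                 if current_node not in seen:
--                     seen.add(current_node)
--                     tour.append(current_node)
--                     changed = True
--     return tour
-- ===== Notes on version B (the rewrite author's own statement) =====
-- stated objective: alternative
-- what changed: B replaces A's recursion and its per-round graph/tour copies, per-edge copy+remove and linear tour-membership scans by an iterative fixed-point loop that maintains a hash set alongside the tour and reads the successor directly as edge[1]/edge[0].
-- outside the precondition, e.g. on iterator(0, [[1], [1, 2]], []): A returns [], B returns []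
import Mathlib
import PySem

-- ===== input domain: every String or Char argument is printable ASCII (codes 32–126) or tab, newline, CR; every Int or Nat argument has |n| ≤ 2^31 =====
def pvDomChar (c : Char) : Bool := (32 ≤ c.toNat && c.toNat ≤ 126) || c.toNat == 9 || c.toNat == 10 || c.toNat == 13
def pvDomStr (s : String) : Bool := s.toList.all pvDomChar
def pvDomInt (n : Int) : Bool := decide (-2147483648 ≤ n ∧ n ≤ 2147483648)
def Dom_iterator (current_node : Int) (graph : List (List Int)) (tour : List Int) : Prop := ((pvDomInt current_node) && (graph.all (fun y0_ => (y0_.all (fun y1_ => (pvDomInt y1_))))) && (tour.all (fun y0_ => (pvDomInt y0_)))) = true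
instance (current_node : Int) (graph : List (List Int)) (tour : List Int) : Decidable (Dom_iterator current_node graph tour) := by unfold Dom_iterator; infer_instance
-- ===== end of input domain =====

-- B replaces A's recursive fixed-point pass (with per-edge copy/remove and linear tour-membership
-- scans) by an iterative loop maintaining a membership set alongside the tour; equivalence of the
-- RETURN value is proved (both A and B also mutate `tour` in place in Python).


-- ===== PORT A =====
-- one body of A's `for edge in copy:` loop, state = (current_node, tour)
def iteratorStepA (st : Int × List Int) (edge : List Int) : Int × List Int :=
  if edge.contains st.1 then
    match PySem.List.remove? edge st.1 with
    | none => st          -- unreachable: the guard means st.1 ∈ edge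
    | some ce =>
      match PySem.List.pyGet? ce 0 with
      | none => st        -- c_edge[0] raises IndexError (singleton edge); excluded by Pre_
      | some c' => (c', if st.2.contains c' then st.2 else st.2 ++ [c'])
  else st

-- A's recursion; fuel bounds the recursion depth (each recursive call strictly grows `tour`
-- with elements of graph's edges, so graph.flatten.length + 1 rounds always suffice)
def iteratorLoopA : Nat → Int → List (List Int) → List Int → List Int
  | 0, _, _, tour => tour
  | fuel+1, c, g, tour =>
    let st := g.foldl iteratorStepA (c, tour)
    if tour ≠ st.2 then iteratorLoopA fuel st.1 g st.2 else st.2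

def iterator (current_node : Int) (graph : List (List Int)) (tour : List Int) : List Int :=
  iteratorLoopA (graph.flatten.length + 1) current_node graph tour

-- ===== PORT B =====
-- one body of B's `for edge in graph:` loop, state = (current_node, tour, seen, changed)
def iteratorStepB (st : Int × List Int × PySem.Set Int × Bool) (edge : List Int) :
    Int × List Int × PySem.Set Int × Bool :=
  if edge.contains st.1 then
    match PySem.List.pyGet? edge 0 with
    | none => st          -- unreachable: the guard means edge ≠ []
    | some e0 =>
      match (if e0 = st.1 then PySem.List.pyGet? edge 1 else some e0) with
      | none => st        -- edge[1] raises IndexError (singleton edge); excluded by Pre_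
      | some n =>
        if (st.2.2.1).contains n then (n, st.2.1, st.2.2.1, st.2.2.2)
        else (n, st.2.1 ++ [n], (st.2.2.1).add n, true)
  else st

-- B's `while changed:` loop (same fuel bound as A's recursion depth)
def iteratorLoopB : Nat → Int → List (List Int) → List Int → PySem.Set Int → List Int
  | 0, _, _, tour, _ => tour
  | fuel+1, c, g, tour, seen =>
    let st := g.foldl iteratorStepB (c, tour, seen, false)
    if st.2.2.2 then iteratorLoopB fuel st.1 g st.2.1 st.2.2.1 else st.2.1

def iterator_alt (current_node : Int) (graph : List (List Int)) (tour : List Int) : List Int :=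
  iteratorLoopB (graph.flatten.length + 1) current_node graph tour (PySem.Set.ofList tour)

-- ===== PRECONDITION & SPEC =====
-- elements of edges of length ≥ 2: the only values current_node can ever become
def pvFlatten2 (graph : List (List Int)) : List Int :=
  (graph.filter (fun e => 2 ≤ e.length)).flatten

-- Both A and B raise IndexError when the walk's current node reaches a length-1 edge; whether it is
-- reached is dynamic, so Pre_ conservatively excludes every graph with a length-1 edge whose node is
-- the start node or an element of a length-≥2 edge (the only values current_node can take); on a few
-- excluded inputs the edge is never reached and A returns — B returns the same value there.
def Pre_iterator (current_node : Int) (graph : List (List Int)) (tour : List Int) : Prop :=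
  ∀ e ∈ graph, e.length = 1 → ∀ x ∈ e, x ≠ current_node ∧ x ∉ pvFlatten2 graph
instance (current_node : Int) (graph : List (List Int)) (tour : List Int) : Decidable (Pre_iterator current_node graph tour) := by unfold Pre_iterator; infer_instance

def pvWitness_iterator : Int × List (List Int) × List Int := (0, [[0, 1], [1, 2]], [0])

def Spec_iterator (current_node : Int) (graph : List (List Int)) (tour : List Int) (out : List Int) : Prop := out = iterator_alt current_node graph tour
instance (current_node : Int) (graph : List (List Int)) (tour : List Int) (out : List Int) : Decidable (Spec_iterator current_node graph tour out) := by unfold Spec_iterator; infer_instance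

-- ===== CLAIM (what is proved, stated in full; the proofs are below) =====
def Claim_equal_iterator : Prop := ∀ (current_node : Int) (graph : List (List Int)) (tour : List Int), Dom_iterator current_node graph tour → Pre_iterator current_node graph tour → Spec_iterator current_node graph tour (iterator current_node graph tour)

-- ===== LEMMAS AND PROOFS =====

-- values current_node can take during the run
def OkNode (c0 : Int) (g : List (List Int)) (c : Int) : Prop := c = c0 ∨ c ∈ pvFlatten2 g

-- the seen set of B has exactly the members of the tour of A
def SeenInv (t : List Int) (s : PySem.Set Int) : Prop := ∀ x : Int, s.contains x = t.contains x

lemma seenInv_ofList (t : List Int) : SeenInv t (PySem.Set.ofList t) := by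
  intro x
  simp [PySem.Set.contains, PySem.Set.mem_ofList]

lemma seenInv_add (t : List Int) (s : PySem.Set Int) (n : Int)
    (hns : s.contains n = false) (h : SeenInv t s) :
    SeenInv (t ++ [n]) (s.add n) := by
  intro x
  have hx := h x
  simp only [PySem.Set.add, PySem.Set.contains] at *
  by_cases hxn : x = n <;> by_cases hxs : x ∈ s <;> simp_all [List.contains_eq_mem]

lemma mem_flatten2 {g : List (List Int)} {e : List Int} {x : Int}
    (he : e ∈ g) (hl : 2 ≤ e.length) (hx : x ∈ e) : x ∈ pvFlatten2 g := by
  simp [pvFlatten2, List.mem_flatten]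
  exact ⟨e, ⟨he, hl⟩, hx⟩

-- one pass over a suffix of edges: the two folds stay in lockstep
lemma pass_rel (c0 : Int) (g : List (List Int)) (hPre : Pre_iterator c0 g []) :
    ∀ (edges : List (List Int)), (∀ e ∈ edges, e ∈ g) →
    ∀ (c : Int) (t : List Int) (s : PySem.Set Int) (ch : Bool),
      OkNode c0 g c → SeenInv t s →
      ∃ c' d s',
        edges.foldl iteratorStepA (c, t) = (c', t ++ d) ∧
        edges.foldl iteratorStepB (c, t, s, ch) = (c', t ++ d, s', ch || !d.isEmpty) ∧
        SeenInv (t ++ d) s' ∧ OkNode c0 g c' := by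
  intro edges
  induction edges with
  | nil =>
    intro _ c t s ch hok hinv
    exact ⟨c, [], s, by simp, by simp, by simpa using hinv, hok⟩
  | cons e es ih =>
    intro hsub c t s ch hok hinv
    have heg : e ∈ g := hsub e (List.mem_cons_self ..)
    have hsub' : ∀ e' ∈ es, e' ∈ g := fun e' h => hsub e' (List.mem_cons_of_mem _ h)
    by_cases hc : e.contains c
    · have hce : c ∈ e := by simpa using hc
      -- under Pre_ the matched edge has length ≥ 2
      have hlen : 2 ≤ e.length := by
        by_contra hlt
        have h0 : 0 < e.length := List.length_pos_of_mem hce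
        have h1 : e.length = 1 := by omega
        obtain ⟨hne, hnf⟩ := hPre e heg h1 c hce
        rcases hok with h | h
        · exact hne h
        · exact hnf h
      cases e with
      | nil => simp at hce
      | cons a e' =>
        cases e' with
        | nil => simp at hlen
        | cons b rest =>
          have hnmem : (if a = c then b else a) ∈ a :: b :: rest := by
            by_cases hac : a = c <;> simp [hac]
          have hok' : OkNode c0 g (if a = c then b else a) :=
            Or.inr (mem_flatten2 heg hlen hnmem)
          have hg1 : PySem.List.pyGet? (a :: b :: rest) 1 = some b := by
            simp [PySem.List.pyGet?, PySem.List.pyIdx?]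
          -- step A computes the same successor as step B
          have hstepA : iteratorStepA (c, t) (a :: b :: rest) =
              ((if a = c then b else a),
               if t.contains (if a = c then b else a) then t
               else t ++ [if a = c then b else a]) := by
            by_cases hac : a = c
            · subst hac
              simp [iteratorStepA, PySem.List.remove?_cons_self,
                PySem.List.pyGet?_zero_cons]
            · have hcbr : c ∈ b :: rest := by
                rcases List.mem_cons.mp hce with h | h
                · exact absurd h.symm hac
                · exact h
              have hrm : PySem.List.remove? (a :: b :: rest) c =
                  some (a :: (b :: rest).erase c) := by
                rw [PySem.List.remove?_cons_of_ne _ hac,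
                    PySem.List.remove?_eq_some_erase _ _ hcbr]
                rfl
              simp [iteratorStepA, hce, hrm, hac]
          have hstepB : iteratorStepB (c, t, s, ch) (a :: b :: rest) =
              if s.contains (if a = c then b else a)
              then ((if a = c then b else a), t, s, ch)
              else ((if a = c then b else a), t ++ [if a = c then b else a],
                    s.add (if a = c then b else a), true) := by
            by_cases hac : a = c
            · subst hac
              simp [iteratorStepB, PySem.List.pyGet?_zero_cons]
            · simp [iteratorStepB, hce, PySem.List.pyGet?_zero_cons, hac]
          set n : Int := if a = c then b else a with hn
          by_cases hmem : t.contains n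
          · -- already in the tour: both sides leave tour and seen unchanged
            have hsm : s.contains n = true := by rw [hinv n]; exact hmem
            obtain ⟨c', d, s', hA, hB, hinv', hok''⟩ := ih hsub' n t s ch hok' hinv
            refine ⟨c', d, s', ?_, ?_, hinv', hok''⟩
            · rw [List.foldl_cons, hstepA, if_pos hmem]; exact hA
            · rw [List.foldl_cons, hstepB, if_pos hsm]; exact hB
          · -- new node: appended on both sides, B records changed := true
            have hmem' : t.contains n = false := by simpa using hmem
            have hsm : s.contains n = false := by rw [hinv n]; exact hmem'
            obtain ⟨c', d, s', hA, hB, hinv', hok''⟩ :=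
              ih hsub' n (t ++ [n]) (s.add n) true hok' (seenInv_add t s n hsm hinv)
            have hcat : t ++ n :: d = (t ++ [n]) ++ d := by simp
            refine ⟨c', n :: d, s', ?_, ?_, by rw [hcat]; exact hinv', hok''⟩
            · rw [List.foldl_cons, hstepA, if_neg (by simpa using hmem'), hcat]; exact hA
            · have hB' : es.foldl iteratorStepB (n, t ++ [n], s.add n, true) =
                  (c', (t ++ [n]) ++ d, s', true) := by simpa using hB
              rw [List.foldl_cons, hstepB, if_neg (by simpa using hsm), hcat]
              simpa using hB'
    · -- edge skipped by both programs
      have hcm : c ∉ e := by simpa using hc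
      obtain ⟨c', d, s', hA, hB, hinv', hok'⟩ := ih hsub' c t s ch hok hinv
      refine ⟨c', d, s', ?_, ?_, hinv', hok'⟩
      · rw [List.foldl_cons, show iteratorStepA (c, t) e = (c, t) by
          simp [iteratorStepA, hcm]]
        exact hA
      · rw [List.foldl_cons, show iteratorStepB (c, t, s, ch) e = (c, t, s, ch) by
          simp [iteratorStepB, hcm]]
        exact hB

-- the outer loops agree round by round (same fuel on both sides)
lemma loop_rel (c0 : Int) (g : List (List Int)) (hPre : Pre_iterator c0 g []) :
    ∀ (fuel : Nat) (c : Int) (t : List Int) (s : PySem.Set Int),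
      OkNode c0 g c → SeenInv t s →
      iteratorLoopA fuel c g t = iteratorLoopB fuel c g t s := by
  intro fuel
  induction fuel with
  | zero => intro c t s _ _; rfl
  | succ fuel ih =>
    intro c t s hok hinv
    obtain ⟨c', d, s', hA, hB, hinv', hok'⟩ :=
      pass_rel c0 g hPre g (fun _ h => h) c t s false hok hinv
    cases d with
    | nil => simp [iteratorLoopA, iteratorLoopB, hA, hB]
    | cons x xs =>
      have hne : t ≠ t ++ x :: xs := by
        intro h
        have := congrArg List.length h
        simp at this
      simp only [iteratorLoopA, iteratorLoopB, hA, hB]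
      simp [hne, ih c' (t ++ x :: xs) s' hok' hinv']

-- ===== VERDICT (by name: the statement is the Claim_ definition above) =====
theorem iterator_spec : Claim_equal_iterator := by
  intro c0 g t _ hPre
  unfold Spec_iterator iterator iterator_alt
  exact loop_rel c0 g (by intro e he hl x hx; exact hPre e he hl x hx) _ c0 t
    (PySem.Set.ofList t) (Or.inl rfl) (seenInv_ofList t)
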